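-- pv_equiv track=rewrite | github.com/VTSTech/AgentNova | agentnova/core/agent.py | _is_greeting_or_simple
-- ===== SOURCE A (Python) =====
-- def _is_greeting_or_simple(text: str) -> bool:
--     """
--     Check if the user input is a simple greeting or short message
--     that shouldn't require tool usage.
--     """
--     lower = text.lower().strip()
--     greetings = [
--         "hi", "hello", "hey", "hola", "howdy", "greetings",
--         "good morning", "good afternoon", "good evening",
--         "what's up", "whats up", "sup", "yo",
--         "thanks", "thank you", "ok", "okay", "yes", "no", "sure",
--         "bye", "goodbye", "see you", "cya",
--     ]
--
--     # Check for exact match or greeting at start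
--     if lower in greetings:
--         return True
--     for g in greetings:
--         if lower.startswith(g + " "):
--             return True
--
--     # Very short messages (< 10 chars) are likely simple
--     if len(lower) < 10 and not any(c in lower for c in "0123456789+-*/=><"):
--         return True
--
--     return False
-- ===== SOURCE B (Python) =====
-- _GREETINGS = frozenset((
--     "hi", "hello", "hey", "hola", "howdy", "greetings",
--     "good morning", "good afternoon", "good evening",
--     "what's up", "whats up", "sup", "yo",
--     "thanks", "thank you", "ok", "okay", "yes", "no", "sure",
--     "bye", "goodbye", "see you", "cya",
-- ))
-- # all prefixes of greetings: the states of an anchored prefix automaton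
-- _PREFIXES = frozenset(g[:i] for g in _GREETINGS for i in range(len(g) + 1))
-- _BAD = "0123456789+-*/=><"
--
--
-- def _match(cur, rest):
--     """Anchored automaton walk: cur is the matched prefix (a state, i.e. a
--     prefix of some greeting), rest the unread input.  Accept when a full
--     greeting has been read and the input ends or continues with a space."""
--     if not rest:
--         return cur in _GREETINGS
--     if cur in _GREETINGS and rest[0] == " ":
--         return True
--     cur2 = cur + rest[0]
--     return cur2 in _PREFIXES and _match(cur2, rest[1:])
--
--
-- def _is_greeting_or_simple(text: str) -> bool:
--     lower = text.lower().strip()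
--     # one left-to-right automaton pass instead of per-greeting scans
--     if _match("", lower):
--         return True
--     # early-exit scan for digit/operator characters, then the length test
--     for ch in lower:
--         if ch in _BAD:
--             return False
--     return len(lower) < 10
-- ===== Notes on version B (the rewrite author's own statement) =====
-- stated objective: alternative
-- what changed: The exact-membership test and the per-greeting startswith loop are replaced by a single anchored prefix-automaton walk over the input (states = the set of all prefixes of the greetings, accepting when a whole greeting is read followed by end-of-string or a space), and the per-bad-char substring scans become one early-exit pass over the text.
import Mathlib
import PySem

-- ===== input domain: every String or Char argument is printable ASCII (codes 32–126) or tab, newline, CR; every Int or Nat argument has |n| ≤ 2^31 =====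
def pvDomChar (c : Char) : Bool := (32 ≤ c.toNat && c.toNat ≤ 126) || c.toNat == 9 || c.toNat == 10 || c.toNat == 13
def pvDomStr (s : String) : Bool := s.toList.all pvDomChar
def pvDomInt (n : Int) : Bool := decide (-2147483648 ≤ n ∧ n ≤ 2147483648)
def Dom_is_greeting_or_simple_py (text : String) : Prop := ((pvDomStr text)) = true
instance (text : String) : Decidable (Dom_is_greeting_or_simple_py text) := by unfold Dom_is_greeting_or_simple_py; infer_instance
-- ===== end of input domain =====

-- B replaces the exact-membership test plus the per-greeting startswith loop by one
-- anchored prefix-automaton walk over the input, and the per-bad-char scans by one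
-- early-exit pass over the text (objective: alternative).

-- ===== PORT A =====
def pvGreetingsA : List String :=
  ["hi", "hello", "hey", "hola", "howdy", "greetings",
   "good morning", "good afternoon", "good evening",
   "what's up", "whats up", "sup", "yo",
   "thanks", "thank you", "ok", "okay", "yes", "no", "sure",
   "bye", "goodbye", "see you", "cya"]

def is_greeting_or_simple_py (text : String) : Bool :=
  let lower := PySem.Str.strip (PySem.Str.lower text)
  if pvGreetingsA.contains lower then true
  else if pvGreetingsA.any (fun g => PySem.Str.startswith lower (g ++ " ")) then true
  else if PySem.Str.len lower < 10
          && !(("0123456789+-*/=><" : String).toList.any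
                 (fun c => PySem.Chars.isIn [c] lower.toList)) then true
  else false

-- ===== PORT B =====
def pvGB : List (List Char) :=
  (["hi", "hello", "hey", "hola", "howdy", "greetings",
    "good morning", "good afternoon", "good evening",
    "what's up", "whats up", "sup", "yo",
    "thanks", "thank you", "ok", "okay", "yes", "no", "sure",
    "bye", "goodbye", "see you", "cya"] : List String).map String.toList

-- all prefixes of greetings: the states of the anchored prefix automaton
def pvPrefB : List (List Char) :=
  pvGB.flatMap (fun g => (List.range (g.length + 1)).map (fun i => g.take i))

def pvBadB : List Char := ("0123456789+-*/=><" : String).toList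

-- anchored automaton walk: cur is the matched prefix, rest the unread input
def pvMatchB (cur : List Char) (rest : List Char) : Bool :=
  match rest with
  | [] => pvGB.contains cur
  | x :: xs =>
    if pvGB.contains cur && x == ' ' then true
    else
      let cur2 := cur ++ [x]
      pvPrefB.contains cur2 && pvMatchB cur2 xs

-- early-exit scan of the for-loop over the text
def pvHasBadB : List Char → Bool
  | [] => false
  | c :: cs => if pvBadB.contains c then true else pvHasBadB cs

def is_greeting_or_simple_py_alt (text : String) : Bool :=
  let lower := PySem.Str.strip (PySem.Str.lower text)
  if pvMatchB [] lower.toList then true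
  else if pvHasBadB lower.toList then false
  else PySem.Str.len lower < 10

-- ===== PRECONDITION & SPEC =====
def Spec_is_greeting_or_simple_py (text : String) (out : Bool) : Prop := out = is_greeting_or_simple_py_alt text
instance (text : String) (out : Bool) : Decidable (Spec_is_greeting_or_simple_py text out) := by unfold Spec_is_greeting_or_simple_py; infer_instance

-- ===== CLAIM (what is proved, stated in full; the proofs are below) =====
def Claim_equal_is_greeting_or_simple_py : Prop := ∀ (text : String), Dom_is_greeting_or_simple_py text → Spec_is_greeting_or_simple_py text (is_greeting_or_simple_py text)

-- ===== LEMMAS AND PROOFS =====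

-- prefixes of greetings are states
theorem pv_mem_pref {p g : List Char} (hg : g ∈ pvGB) (hp : p <+: g) : p ∈ pvPrefB := by
  unfold pvPrefB
  rw [List.mem_flatMap]
  refine ⟨g, hg, ?_⟩
  rw [List.mem_map]
  exact ⟨p.length, by simpa using Nat.lt_succ_of_le hp.length_le,
    (List.prefix_iff_eq_take.mp hp).symm⟩

-- no state has the form (greeting ++ " " ++ t): checked on the finite data
set_option maxRecDepth 20000 in
theorem pv_state_no_greet_space :
    ∀ p ∈ pvPrefB, ∀ g ∈ pvGB, ¬ (g ++ [' ']) <+: p := by decide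

set_option maxRecDepth 20000 in
theorem pv_nil_mem_pref : ([] : List Char) ∈ pvPrefB := by decide

theorem pvGB_eq : pvGB = pvGreetingsA.map String.toList := rfl

-- characterisation of the automaton: it accepts from a state cur exactly when some
-- greeting equals cur ++ rest or is followed by a space in cur ++ rest
theorem pv_match_iff (rest : List Char) : ∀ cur : List Char, cur ∈ pvPrefB →
    (pvMatchB cur rest = true ↔
      ∃ g ∈ pvGB, cur ++ rest = g ∨ ∃ t, cur ++ rest = g ++ ' ' :: t) := by
  induction rest with
  | nil =>
    intro cur hcur
    simp only [pvMatchB, List.contains_iff_mem, List.append_nil]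
    constructor
    · intro h; exact ⟨cur, h, Or.inl rfl⟩
    · rintro ⟨g, hg, rfl | ⟨t, rfl⟩⟩
      · exact hg
      · exact absurd ⟨t, by simp⟩ (pv_state_no_greet_space _ hcur g hg)
  | cons x xs ih =>
    intro cur hcur
    simp only [pvMatchB]
    by_cases hacc : (pvGB.contains cur && x == ' ') = true
    · rw [if_pos hacc]
      obtain ⟨hmem, hx⟩ := Bool.and_eq_true _ _ |>.mp hacc
      have hmem' : cur ∈ pvGB := List.contains_iff_mem.mp hmem
      have hx' : x = ' ' := by simpa using hx
      simp only [true_iff]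
      exact ⟨cur, hmem', Or.inr ⟨xs, by rw [hx']⟩⟩
    · rw [if_neg hacc]
      by_cases h2 : (cur ++ [x]) ∈ pvPrefB
      · have hc2 : pvPrefB.contains (cur ++ [x]) = true := List.contains_iff_mem.mpr h2
        rw [hc2, Bool.true_and, ih _ h2]
        simp only [List.append_assoc, List.singleton_append]
      · have hc2 : pvPrefB.contains (cur ++ [x]) = false := by
          simp only [← Bool.not_eq_true, List.contains_iff_mem]; exact h2
        rw [hc2, Bool.false_and]
        refine iff_of_false (by simp) ?_
        rintro ⟨g, hg, hcase⟩
        -- in either case g is a prefix of cur ++ x :: xs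
        have hgpre : g <+: cur ++ x :: xs := by
          rcases hcase with rfl | ⟨t, ht⟩
          · exact List.prefix_refl _
          · exact ⟨' ' :: t, by rw [ht]⟩
        have hcurpre : cur ++ [x] <+: cur ++ x :: xs := ⟨xs, by simp⟩
        by_cases hlen : cur.length + 1 ≤ g.length
        · -- cur ++ [x] is then a prefix of g, hence a state: contradiction with h2
          have : cur ++ [x] <+: g :=
            List.prefix_of_prefix_length_le hcurpre hgpre (by simpa using hlen)
          exact h2 (pv_mem_pref hg this)
        · -- g is short: g fits inside cur, so the accept test or the state fact is violated
          have hgle : g.length ≤ cur.length := by omega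
          rcases hcase with heq | ⟨t, ht⟩
          · have := congrArg List.length heq
            simp at this; omega
          · have hgsp : g ++ [' '] <+: cur ++ x :: xs := ⟨t, by rw [ht]; simp⟩
            have hcurL : cur <+: cur ++ x :: xs := ⟨x :: xs, rfl⟩
            rcases eq_or_lt_of_le hgle with heq | hlt
            · -- g = cur and x = ' ': the accept branch would have fired
              have hgc : g <+: cur := List.prefix_of_prefix_length_le hgpre hcurL hgle
              have hgcur : g = cur := List.IsPrefix.eq_of_length hgc heq
              subst hgcur
              have hpp : g ++ [' '] <+: g ++ [x] :=
                List.prefix_of_prefix_length_le hgsp hcurpre (by simp)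
              have hx : x = ' ' := by
                have := List.IsPrefix.eq_of_length hpp (by simp)
                simpa using (List.append_cancel_left this).symm
              exact hacc (by simp [hx]; exact hg)
            · -- g ++ " " is a prefix of cur, a state: contradicts the state fact
              have : g ++ [' '] <+: cur :=
                List.prefix_of_prefix_length_le hgsp hcurL (by simp; omega)
              exact pv_state_no_greet_space cur hcur g hg this

-- membership of a single character as substring containment
theorem pv_isIn_singleton (c : Char) (l : List Char) :
    PySem.Chars.isIn [c] l = true ↔ c ∈ l := by
  rw [PySem.Chars.isIn_iff_infix]
  constructor
  · intro hinf
    exact hinf.subset (by simp)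
  · intro hc
    obtain ⟨s, t, rfl⟩ := List.append_of_mem hc
    exact ⟨s, t, by simp⟩

-- the early-exit scan finds exactly the bad characters A's any(...) finds
theorem pv_hasBad_eq (l : List Char) :
    pvHasBadB l = ("0123456789+-*/=><" : String).toList.any (fun c => PySem.Chars.isIn [c] l) := by
  rw [Bool.eq_iff_iff, List.any_eq_true]
  constructor
  · intro h
    induction l with
    | nil => simp [pvHasBadB] at h
    | cons c cs ih =>
      unfold pvHasBadB at h
      split at h
      · next hc => exact ⟨c, List.contains_iff_mem.mp hc, (pv_isIn_singleton c _).mpr (by simp)⟩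
      · obtain ⟨b, hb, hIn⟩ := ih h
        exact ⟨b, hb, (pv_isIn_singleton b _).mpr (by
          simp [List.mem_cons, (pv_isIn_singleton b cs).mp hIn])⟩
  · rintro ⟨b, hb, hIn⟩
    have hbm := (pv_isIn_singleton b l).mp hIn
    induction l with
    | nil => simp at hbm
    | cons c cs ih =>
      unfold pvHasBadB
      rcases List.mem_cons.mp hbm with rfl | hbm'
      · rw [if_pos (show pvBadB.contains b = true from List.contains_iff_mem.mpr hb)]
      · split
        · rfl
        · exact ih ((pv_isIn_singleton b cs).mpr hbm') hbm'

-- the automaton from the initial state equals A's two greeting checks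
theorem pv_match_greet (l : String) :
    pvMatchB [] l.toList =
      (pvGreetingsA.contains l
        || pvGreetingsA.any (fun g => PySem.Str.startswith l (g ++ " "))) := by
  rw [Bool.eq_iff_iff, pv_match_iff l.toList [] pv_nil_mem_pref]
  simp only [List.nil_append, Bool.or_eq_true, List.any_eq_true, List.contains_iff_mem,
    PySem.Str.startswith_eq, PySem.Chars.startswith_iff, String.toList_append]
  have hGB : ∀ g : List Char, g ∈ pvGB ↔ ∃ s ∈ pvGreetingsA, s.toList = g := by
    intro g; rw [pvGB_eq, List.mem_map]
  have hsp : (" " : String).toList = [' '] := rfl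
  constructor
  · rintro ⟨g, hg, rfl | ⟨t, ht⟩⟩
    · obtain ⟨s, hs, hse⟩ := (hGB _).mp hg
      exact Or.inl (by rwa [String.toList_inj.mp hse] at hs)
    · obtain ⟨s, hs, hse⟩ := (hGB _).mp hg
      refine Or.inr ⟨s, hs, ?_⟩
      rw [hsp, hse, ht]
      exact ⟨t, by simp⟩
  · rintro (hmem | ⟨s, hs, hpre⟩)
    · exact ⟨l.toList, (hGB _).mpr ⟨l, hmem, rfl⟩, Or.inl rfl⟩
    · refine ⟨s.toList, (hGB _).mpr ⟨s, hs, rfl⟩, ?_⟩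
      obtain ⟨t, ht⟩ := hpre
      rw [hsp] at ht
      exact Or.inr ⟨t, by rw [← ht]; simp⟩

-- ===== VERDICT (by name: the statement is the Claim_ definition above) =====
theorem is_greeting_or_simple_py_spec : Claim_equal_is_greeting_or_simple_py := by
  intro text _
  unfold Spec_is_greeting_or_simple_py is_greeting_or_simple_py is_greeting_or_simple_py_alt
  set l := PySem.Str.strip (PySem.Str.lower text) with hl
  show (if pvGreetingsA.contains l = true then true
        else if (pvGreetingsA.any fun g => PySem.Str.startswith l (g ++ " ")) = true then true
        else if (decide (PySem.Str.len l < 10) &&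
            !("0123456789+-*/=><" : String).toList.any
              (fun c => PySem.Chars.isIn [c] l.toList)) = true then true
        else false)
      = (if pvMatchB [] l.toList = true then true
         else if pvHasBadB l.toList = true then false
         else decide (PySem.Str.len l < 10))
  rw [pv_match_greet l, pv_hasBad_eq]
  cases h1 : pvGreetingsA.contains l <;>
    cases h2 : pvGreetingsA.any (fun g => PySem.Str.startswith l (g ++ " ")) <;>
      cases h3 : decide (PySem.Str.len l < 10) <;>
        cases h4 : ("0123456789+-*/=><" : String).toList.any
            (fun c => PySem.Chars.isIn [c] l.toList) <;>
          decide
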